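-- pv_equiv track=rewrite | github.com/takajin0114/kyotei_Prediction | kyotei_predictor/tools/optimization/optimize_graduated_reward_continuous.py | action_to_trifecta
-- ===== SOURCE A (Python) =====
-- def action_to_trifecta(action: int):
--     """アクションを三連複に変換"""
--     # 6艇の組み合わせを生成
--     combinations = []
--     for i in range(6):
--         for j in range(6):
--             for k in range(6):
--                 if i != j and j != k and i != k:
--                     combinations.append((i+1, j+1, k+1))
--
--     if 0 <= action < len(combinations):
--         return combinations[action]
--     else:
--         return (1, 2, 3)  # デフォルト
-- ===== SOURCE B (Python) =====
-- def action_to_trifecta(action: int):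
--     """アクションを三連複に変換"""
--     if 0 <= action < 120:
--         i, r = divmod(action, 20)
--         rest = [x for x in range(1, 7) if x != i + 1]
--         j = rest[r // 4]
--         rest2 = [x for x in rest if x != j]
--         k = rest2[r % 4]
--         return (i + 1, j, k)
--     return (1, 2, 3)  # デフォルト
-- ===== Notes on version B (the rewrite author's own statement) =====
-- stated objective: simpler
-- what changed: Replaces the triple nested loop that builds the full list of trifecta permutations with direct combinatorial unranking of the action index, picking each boat from the shrinking candidate list.
import Mathlib
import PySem

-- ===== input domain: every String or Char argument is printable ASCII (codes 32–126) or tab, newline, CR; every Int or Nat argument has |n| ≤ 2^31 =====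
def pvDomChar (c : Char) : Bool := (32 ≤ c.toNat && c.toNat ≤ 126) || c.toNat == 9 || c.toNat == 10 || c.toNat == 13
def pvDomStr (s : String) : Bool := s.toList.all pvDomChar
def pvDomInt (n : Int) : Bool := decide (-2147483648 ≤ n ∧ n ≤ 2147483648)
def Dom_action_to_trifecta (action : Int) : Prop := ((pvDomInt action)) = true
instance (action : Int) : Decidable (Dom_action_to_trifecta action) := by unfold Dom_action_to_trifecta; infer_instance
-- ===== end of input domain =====

-- B replaces the triple nested loop building all 120 permutations by direct
-- combinatorial unranking of the action index (objective: simpler).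


-- ===== PORT A =====
-- literal port: triple nested loop over range(6) building the combinations list
def action_to_trifecta (action : Int) : Int × Int × Int :=
  let combinations : List (Int × Int × Int) :=
    (PySem.List.pyRange 0 6 1).foldl (fun acc i =>
    (PySem.List.pyRange 0 6 1).foldl (fun acc j =>
      (PySem.List.pyRange 0 6 1).foldl (fun acc k =>
        if i ≠ j ∧ j ≠ k ∧ i ≠ k then acc ++ [(i+1, j+1, k+1)] else acc) acc) acc) []
  if 0 ≤ action ∧ action < (combinations.length : Int) then
    -- combinations[action]: the guard makes the index in range, so pyGet? is some;
    -- the default is unreachable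
    (PySem.List.pyGet? combinations action).getD (1, 2, 3)
  else
    (1, 2, 3)

-- ===== PORT B =====
def action_to_trifecta_alt (action : Int) : Int × Int × Int :=
  if 0 ≤ action ∧ action < 120 then
    let i := PySem.Int.floordiv action 20
    let r := PySem.Int.mod action 20
    let rest := (PySem.List.pyRange 1 7 1).filter (fun x => x ≠ i + 1)
    let j := (PySem.List.pyGet? rest (PySem.Int.floordiv r 4)).getD 0
    let rest2 := rest.filter (fun x => x ≠ j)
    let k := (PySem.List.pyGet? rest2 (PySem.Int.mod r 4)).getD 0
    (i + 1, j, k)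
  else
    (1, 2, 3)

-- ===== PRECONDITION & SPEC =====
def Spec_action_to_trifecta (action : Int) (out : Int × Int × Int) : Prop := out = action_to_trifecta_alt action
instance (action : Int) (out : Int × Int × Int) : Decidable (Spec_action_to_trifecta action out) := by unfold Spec_action_to_trifecta; infer_instance

-- ===== CLAIM (what is proved, stated in full; the proofs are below) =====
def Claim_equal_action_to_trifecta : Prop := ∀ (action : Int), Dom_action_to_trifecta action → Spec_action_to_trifecta action (action_to_trifecta action)

-- ===== LEMMAS AND PROOFS =====

-- the two ports agree on every in-range index, checked exhaustively
set_option maxRecDepth 8000 in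
theorem agree_in_range : ∀ n : Fin 120, action_to_trifecta (n.val : Int) = action_to_trifecta_alt (n.val : Int) := by decide

theorem agree_all (a : Int) : action_to_trifecta a = action_to_trifecta_alt a := by
  by_cases h : 0 ≤ a ∧ a < 120
  · have hn : a = ((a.toNat : Nat) : Int) := (Int.toNat_of_nonneg h.1).symm
    have hlt : a.toNat < 120 := by omega
    have := agree_in_range ⟨a.toNat, hlt⟩
    simpa [← hn] using this
  · unfold action_to_trifecta action_to_trifecta_alt
    have h120 : ((PySem.List.pyRange 0 6 1).foldl (fun acc i =>
      (PySem.List.pyRange 0 6 1).foldl (fun acc j =>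
          (PySem.List.pyRange 0 6 1).foldl (fun acc k =>
            if i ≠ j ∧ j ≠ k ∧ i ≠ k then acc ++ [(i+1, j+1, k+1)] else acc) acc) acc)
        ([] : List (Int × Int × Int))).length = 120 := by
        set_option maxRecDepth 8000 in decide
    simp only [h120]
    rw [if_neg (by exact_mod_cast h), if_neg h]

-- ===== VERDICT (by name: the statement is the Claim_ definition above) =====
theorem action_to_trifecta_spec : Claim_equal_action_to_trifecta := by
  intro a _
  unfold Spec_action_to_trifecta
  exact agree_all a
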